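-- pv_equiv track=rewrite | github.com/DBD-research-group/BirdSet | notebooks/playground/plot_multilabel_stats.py | get_multilabel_stats
-- ===== SOURCE A (Python) =====
-- def get_multilabel_stats(multilabel_labels: list) -> tuple[list, dict]:
--     """
--     Generates a list of unique labels in the given label list and counts their occurences
--     """
--     unique_labels = []
--     label_occurences = {}
--     for sample_labels in multilabel_labels:
--         for label in sample_labels:
--             if label not in unique_labels:
--                 unique_labels.append(label)
--             label_occurences[label] = label_occurences.get(label, 0) + 1
--     return unique_labels, label_occurences
-- ===== SOURCE B (Python) =====
-- def get_multilabel_stats(multilabel_labels: list) -> tuple[list, dict]: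
--     """Staged: flatten, dedup in first-seen order, then count each unique label with list.count."""
--     flat = [label for sample in multilabel_labels for label in sample]
--     unique_labels = list(dict.fromkeys(flat))
--     return unique_labels, {label: flat.count(label) for label in unique_labels}
-- ===== Notes on version B (the rewrite author's own statement) =====
-- stated objective: simpler
-- what changed: Replaces A's single pass that incrementally maintains a uniqueness list and a running occurrence dict by three staged passes: flatten, ordered dedup via dict.fromkeys, then a per-unique-label count with flat.count - no incremental counter state at all.
import Mathlib
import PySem

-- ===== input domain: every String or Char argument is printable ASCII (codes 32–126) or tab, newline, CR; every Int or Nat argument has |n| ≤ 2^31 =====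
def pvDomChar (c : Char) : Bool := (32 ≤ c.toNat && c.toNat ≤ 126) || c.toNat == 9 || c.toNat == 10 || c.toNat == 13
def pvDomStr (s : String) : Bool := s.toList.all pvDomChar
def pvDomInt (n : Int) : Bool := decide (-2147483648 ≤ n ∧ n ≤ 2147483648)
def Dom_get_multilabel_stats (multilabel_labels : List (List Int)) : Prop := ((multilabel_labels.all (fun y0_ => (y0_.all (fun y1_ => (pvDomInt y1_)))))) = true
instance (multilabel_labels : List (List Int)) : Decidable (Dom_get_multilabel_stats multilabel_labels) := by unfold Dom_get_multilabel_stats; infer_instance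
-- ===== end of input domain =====

-- B replaces A's single incremental pass by three staged passes: flatten, ordered dedup, then a per-unique count (simpler decomposition; not faster).


-- ===== PORT A =====
-- for sample_labels in …: for label in …: if label not in unique_labels: append; dict get-default + store
def get_multilabel_stats (multilabel_labels : List (List Int)) : List Int × (List (Int × Int)) :=
  let st :=
    multilabel_labels.foldl (fun st sample_labels =>
      sample_labels.foldl (fun st label =>
        let unique := if st.1.contains label then st.1 else st.1 ++ [label]
        (unique, st.2.insert label (st.2.getD label 0 + 1))) st)
      (([] : List Int), (PySem.Dict.empty : PySem.Dict Int Int))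
  (st.1, st.2.items)

-- ===== PORT B =====
-- flat = [label for sample in … for label in sample]; unique = list(dict.fromkeys(flat)); {label: flat.count(label) for label in unique}
def get_multilabel_stats_alt (multilabel_labels : List (List Int)) : List Int × (List (Int × Int)) :=
  let flat := multilabel_labels.flatMap (fun sample => sample)
  let unique := PySem.List.dedup flat
  (unique, unique.map (fun label => (label, (PySem.List.count flat label : Int))))

-- ===== PRECONDITION & SPEC =====
def Spec_get_multilabel_stats (multilabel_labels : List (List Int)) (out : List Int × (List (Int × Int))) : Prop := out = get_multilabel_stats_alt multilabel_labels
instance (multilabel_labels : List (List Int)) (out : List Int × (List (Int × Int))) : Decidable (Spec_get_multilabel_stats multilabel_labels out) := by unfold Spec_get_multilabel_stats; infer_instance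

-- ===== CLAIM =====
def Claim_equal_get_multilabel_stats : Prop := ∀ (multilabel_labels : List (List Int)), Dom_get_multilabel_stats multilabel_labels → Spec_get_multilabel_stats multilabel_labels (get_multilabel_stats multilabel_labels)

-- ===== LEMMAS AND PROOFS =====

-- A's nested loop is the same fold over the flattened list; its body splits into two independent components.
theorem pv_foldl_pair (l : List Int) (u : List Int) (d : PySem.Dict Int Int) :
    l.foldl (fun st label =>
        ((if st.1.contains label then st.1 else st.1 ++ [label]),
          st.2.insert label (st.2.getD label 0 + 1))) (u, d)
      = (l.foldl (fun u label => if u.contains label then u else u ++ [label]) u,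
         l.foldl (fun d label => d.insert label (d.getD label 0 + 1)) d) := by
  induction l generalizing u d with
  | nil => rfl
  | cons x xs ih => simp only [List.foldl_cons]; exact ih _ _

theorem get_multilabel_stats_eq (multilabel_labels : List (List Int)) :
    get_multilabel_stats multilabel_labels = get_multilabel_stats_alt multilabel_labels := by
  unfold get_multilabel_stats get_multilabel_stats_alt
  rw [show multilabel_labels.flatMap (fun sample => sample) = multilabel_labels.flatten by
        simp [List.flatMap]]
  rw [← List.foldl_flatten, pv_foldl_pair]
  simp only [PySem.Dict.foldl_insert_getD_add_one_eq_counter, PySem.Dict.items_counter,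
    PySem.List.dedup_eq_ofList, PySem.List.count_eq]
  rfl

-- ===== VERDICT =====
theorem get_multilabel_stats_spec : Claim_equal_get_multilabel_stats := by
  intro ml _
  unfold Spec_get_multilabel_stats
  exact get_multilabel_stats_eq ml
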